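-- pv_equiv track=rewrite | github.com/Jamesprocode/ISMIR-Jazzmus | jazzmus/dataset/tokenizer.py | note_split
-- ===== SOURCE A (Python) =====
-- def note_split(note_string):
--     if note_string in [".", "*v", "*^", "*"]:
--         tokens = [note_string]
--     else:
--         tokens = []
--         # group in dedicated symbols every pitch letter, i.e., from [a,b,c,d,e,f,g], upper or lower case
--         # the rest is tokenized character by character
--         pitch_letters = set('abcdefgABCDEFG')
--         # tokens = note_string.split()
--         # if two consecutive characters are the same, add them to tokens together, otherwise add them separately
--         current_pitch = ""
--         for i,char in enumerate(note_string):
--             if char in pitch_letters: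
--                 current_pitch = current_pitch + char
--             else:
--                 if current_pitch:
--                     tokens.append(current_pitch)
--                     current_pitch = ""
--                 tokens.append(char)
--         if current_pitch: # if the string ends with a pitch letter
--             tokens.append(current_pitch)
--     return tokens
-- ===== SOURCE B (Python) =====
-- def note_split(note_string):
--     if note_string in [".", "*v", "*^", "*"]:
--         return [note_string]
--     pitch = set('abcdefgABCDEFG')
--     tokens = []
--     i, n = 0, len(note_string)
--     while i < n:
--         if note_string[i] in pitch:
--             j = i + 1
--             while j < n and note_string[j] in pitch:
--                 j += 1
--             tokens.append(note_string[i:j])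
--             i = j
--         else:
--             tokens.append(note_string[i])
--             i += 1
--     return tokens
-- ===== Notes on version B (the rewrite author's own statement) =====
-- stated objective: alternative
-- what changed: Replaces the character-by-character loop that threads a current_pitch accumulator (with flush logic in two places) with a two-pointer run scanner that slices each maximal pitch-letter run out of the string directly.
import Mathlib
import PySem

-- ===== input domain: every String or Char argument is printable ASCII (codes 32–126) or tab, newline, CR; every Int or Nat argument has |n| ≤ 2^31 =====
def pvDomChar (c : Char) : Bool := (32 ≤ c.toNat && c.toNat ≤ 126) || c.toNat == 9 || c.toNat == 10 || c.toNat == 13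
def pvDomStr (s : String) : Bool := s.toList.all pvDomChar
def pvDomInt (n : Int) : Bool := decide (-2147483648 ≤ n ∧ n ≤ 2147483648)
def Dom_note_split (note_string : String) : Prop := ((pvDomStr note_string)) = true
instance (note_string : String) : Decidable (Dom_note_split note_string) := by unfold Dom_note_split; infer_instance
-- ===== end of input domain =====

-- B replaces A's accumulator loop by a two-pointer run scanner slicing maximal pitch runs; same return values.

-- shared: membership in the pitch-letter set 'abcdefgABCDEFG'
def isPitch (c : Char) : Bool := ("abcdefgABCDEFG".toList).contains c

-- ===== PORT A =====
-- A's for-loop over characters with state (tokens, current_pitch)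
def noteLoopA : List Char → List String → List Char → List String
  | [], tokens, cur => if cur ≠ [] then tokens ++ [String.mk cur] else tokens
  | c :: cs, tokens, cur =>
    if isPitch c then noteLoopA cs tokens (cur ++ [c])
    else noteLoopA cs ((if cur ≠ [] then tokens ++ [String.mk cur] else tokens) ++ [String.mk [c]]) []

def note_split (note_string : String) : List String :=
  if note_string = "." ∨ note_string = "*v" ∨ note_string = "*^" ∨ note_string = "*" then
    [note_string]
  else
    noteLoopA note_string.toList [] []

-- ===== PORT B =====
-- B's outer while: at a pitch letter, the inner while advances j past the run (takeWhile/dropWhile), slicing it out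
def runScanB : List Char → List String
  | [] => []
  | c :: cs =>
    if isPitch c then
      String.mk (c :: cs.takeWhile isPitch) :: runScanB (cs.dropWhile isPitch)
    else
      String.mk [c] :: runScanB cs
  termination_by cs => cs.length
  decreasing_by
    · simpa using Nat.lt_succ_of_le (List.length_dropWhile_le _ _)
    · simp

def note_split_alt (note_string : String) : List String :=
  if note_string = "." ∨ note_string = "*v" ∨ note_string = "*^" ∨ note_string = "*" then
    [note_string]
  else
    runScanB note_string.toList

-- ===== PRECONDITION & SPEC =====
def Spec_note_split (note_string : String) (out : List String) : Prop := out = note_split_alt note_string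
instance (note_string : String) (out : List String) : Decidable (Spec_note_split note_string out) := by unfold Spec_note_split; infer_instance

-- ===== CLAIM (what is proved, stated in full; the proofs are below) =====
def Claim_equal_note_split : Prop := ∀ (note_string : String), Dom_note_split note_string → Spec_note_split note_string (note_split note_string)

-- ===== LEMMAS AND PROOFS =====

theorem noteLoopA_tokens (cs : List Char) : ∀ (tokens : List String) (cur : List Char),
    noteLoopA cs tokens cur = tokens ++ noteLoopA cs [] cur := by
  induction cs with
  | nil => intro tokens cur; simp [noteLoopA]; split <;> simp
  | cons c cs ih =>
    intro tokens cur
    simp only [noteLoopA]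
    split
    · rw [ih tokens, ih []]
    · rw [ih, ih]
      split
      · conv_rhs => rw [ih]
        simp
      · conv_rhs => rw [ih]
        simp

theorem runScanB_split (cs : List Char) :
    runScanB cs =
      if cs.takeWhile isPitch = [] then runScanB (cs.dropWhile isPitch)
      else String.mk (cs.takeWhile isPitch) :: runScanB (cs.dropWhile isPitch) := by
  cases cs with
  | nil => simp [runScanB]
  | cons c cs =>
    by_cases h : isPitch c = true
    · simp [runScanB, List.takeWhile_cons, List.dropWhile_cons, h]
    · simp [runScanB, List.takeWhile_cons, List.dropWhile_cons, h]

theorem noteLoopA_runScan (cs : List Char) : ∀ (cur : List Char),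
    noteLoopA cs [] cur =
      if cur ++ cs.takeWhile isPitch = [] then runScanB (cs.dropWhile isPitch)
      else String.mk (cur ++ cs.takeWhile isPitch) :: runScanB (cs.dropWhile isPitch) := by
  induction cs with
  | nil =>
    intro cur
    simp only [noteLoopA, List.takeWhile_nil, List.dropWhile_nil, List.append_nil, runScanB]
    split <;> simp_all
  | cons c cs ih =>
    intro cur
    by_cases h : isPitch c = true
    · simp only [noteLoopA, h, if_pos, List.takeWhile_cons, List.dropWhile_cons]
      rw [ih (cur ++ [c])]
      simp [h]
    · have hA : noteLoopA (c :: cs) [] cur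
          = (if cur ≠ [] then [String.mk cur] else []) ++ [String.mk [c]] ++ noteLoopA cs [] [] := by
        simp only [noteLoopA]
        rw [if_neg h, noteLoopA_tokens]
        split <;> simp
      have htw : List.takeWhile isPitch (c :: cs) = [] := by simp [List.takeWhile_cons, h]
      have hdw : List.dropWhile isPitch (c :: cs) = c :: cs := by simp [List.dropWhile_cons, h]
      rw [hA, ih [], htw, hdw]
      simp only [List.nil_append]
      rw [← runScanB_split]
      have hrB : runScanB (c :: cs) = String.mk [c] :: runScanB cs := by simp [runScanB, h]
      rw [hrB]
      split <;> simp_all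

-- ===== VERDICT (by name: the statement is the Claim_ definition above) =====
theorem note_split_spec : Claim_equal_note_split := by
  intro s _
  unfold Spec_note_split note_split note_split_alt
  split
  · rfl
  · rw [noteLoopA_runScan]
    simp only [List.nil_append]
    rw [← runScanB_split]
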